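-- pv_equiv track=rewrite | github.com/KakaoFarm/Youngkwon-Algorithm | Baekjoon/21611-마법사상어와블리자드.py | do_magic
-- ===== SOURCE A (Python) =====
-- dx = [-1, 1, 0, 0]
--
-- dy = [0, 0, -1, 1]
--
-- def do_magic(board, md, ms):
--     x = len(board) // 2
--     y = len(board) // 2
--     for dist in range(1, ms + 1):
--         nx = x + (dx[md] * dist)
--         ny = y + (dy[md] * dist)
--         if nx in range(len(board)) and ny in range(len(board)):
--             board[nx][ny] = 0
--
--     return board
-- ===== SOURCE B (Python) =====
-- DIRS = [(-1, 0), (1, 0), (0, -1), (0, 1)]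
--
-- def do_magic(board, md, ms):
--     if ms <= 0:
--         return board
--     n = len(board)
--     c = n // 2
--     dxv, dyv = DIRS[md]
--     k = min(ms, c if (dxv < 0 or dyv < 0) else n - 1 - c)
--     if dyv == 0:
--         lo, hi = (c - k, c) if dxv < 0 else (c + 1, c + 1 + k)
--         return [r[:c] + [0] + r[c+1:] if lo <= i < hi else r
--                 for i, r in enumerate(board)]
--     else:
--         lo, hi = (c - k, c) if dyv < 0 else (c + 1, c + 1 + k)
--         return [r[:lo] + [0] * k + r[hi:] if i == c and k > 0 else r
--                 for i, r in enumerate(board)]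
-- ===== Notes on version B (the rewrite author's own statement) =====
-- stated objective: faster
-- what changed: A walks ms steps from the center testing bounds at every step and mutating one cell at a time; B computes the in-bounds run length k in closed form and rebuilds the board in a single pass (slice concatenation for the swept row/column), so the work no longer depends on ms.
import Mathlib
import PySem

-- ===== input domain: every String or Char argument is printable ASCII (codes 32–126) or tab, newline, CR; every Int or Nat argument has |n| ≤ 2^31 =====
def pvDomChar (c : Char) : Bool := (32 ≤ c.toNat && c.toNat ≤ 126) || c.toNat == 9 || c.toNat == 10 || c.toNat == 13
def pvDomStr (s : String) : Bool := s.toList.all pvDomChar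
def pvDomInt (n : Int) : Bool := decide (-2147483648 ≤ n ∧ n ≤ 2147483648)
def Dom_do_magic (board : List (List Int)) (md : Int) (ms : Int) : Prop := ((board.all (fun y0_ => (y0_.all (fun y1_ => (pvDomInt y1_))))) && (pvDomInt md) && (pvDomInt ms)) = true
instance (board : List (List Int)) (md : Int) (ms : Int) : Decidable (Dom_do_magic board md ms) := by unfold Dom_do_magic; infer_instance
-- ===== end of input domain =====

-- B replaces A's per-step loop (ms iterations with a bounds test each) by a closed-form count of the
-- in-bounds cells and a single rebuild of the board; A mutates `board` in place and returns it, B builds a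
-- new list — the equivalence proved here is about the return value only.

-- ===== PORT A =====
def pvDx : List Int := [-1, 1, 0, 0]
def pvDy : List Int := [0, 0, -1, 1]

def do_magic (board : List (List Int)) (md : Int) (ms : Int) : List (List Int) :=
  let x : Int := PySem.Int.floordiv ((board.length : Int)) 2
  let y : Int := PySem.Int.floordiv ((board.length : Int)) 2
  (PySem.List.pyRange 1 (ms + 1) 1).foldl
    (fun b dist =>
      let nx := x + (PySem.List.pyGetD pvDx md 0) * dist
      let ny := y + (PySem.List.pyGetD pvDy md 0) * dist
      if (0 ≤ nx ∧ nx < (board.length : Int)) ∧ (0 ≤ ny ∧ ny < (board.length : Int)) then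
        b.set nx.toNat ((b.getD nx.toNat []).set ny.toNat 0)
      else b)
    board

-- ===== PORT B =====
def pvDirs : List (Int × Int) := [(-1, 0), (1, 0), (0, -1), (0, 1)]

def do_magic_alt (board : List (List Int)) (md : Int) (ms : Int) : List (List Int) :=
  if ms ≤ 0 then board
  else
    let n : Int := (board.length : Int)
    let c : Int := PySem.Int.floordiv n 2
    let dir := PySem.List.pyGetD pvDirs md (0, 0)
    let k : Int := min ms (if dir.1 < 0 ∨ dir.2 < 0 then c else n - 1 - c)
    if dir.2 = 0 then
      let lh : Int × Int := if dir.1 < 0 then (c - k, c) else (c + 1, c + 1 + k)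
      (PySem.List.enumerate board 0).map (fun ir =>
        if lh.1 ≤ ir.1 ∧ ir.1 < lh.2 then
          PySem.List.slice ir.2 none (some c) ++ [0] ++ PySem.List.slice ir.2 (some (c + 1)) none
        else ir.2)
    else
      let lh : Int × Int := if dir.2 < 0 then (c - k, c) else (c + 1, c + 1 + k)
      (PySem.List.enumerate board 0).map (fun ir =>
        if ir.1 = c ∧ 0 < k then
          PySem.List.slice ir.2 none (some lh.1) ++ List.replicate k.toNat 0 ++ PySem.List.slice ir.2 (some lh.2) none
        else ir.2)

-- ===== PRECONDITION & SPEC =====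
-- Pre_ excludes exactly the inputs on which A raises IndexError: ms ≥ 1 with md outside [-4, 4)
-- (dx[md] out of range), or a cell on the swept ray falling outside its (too short) row.
def Pre_do_magic (board : List (List Int)) (md : Int) (ms : Int) : Prop :=
  ms ≤ 0 ∨
  (-4 ≤ md ∧ md < 4 ∧
    (let n := board.length
     let c := n / 2
     let m := (md + 4).toNat % 4
     if m = 0 then ∀ d ∈ List.range (min ms.toNat c), (board.getD (c - 1 - d) []).length > c
     else if m = 1 then ∀ d ∈ List.range (min ms.toNat (n - 1 - c)), (board.getD (c + 1 + d) []).length > c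
     else if m = 2 then min ms.toNat c = 0 ∨ (board.getD c []).length ≥ c
     else min ms.toNat (n - 1 - c) = 0 ∨ (board.getD c []).length ≥ c + min ms.toNat (n - 1 - c) + 1))
instance (board : List (List Int)) (md : Int) (ms : Int) : Decidable (Pre_do_magic board md ms) := by
  unfold Pre_do_magic; infer_instance

def pvWitness_do_magic : List (List Int) × Int × Int := ([[1, 2, 3], [4, 5, 6], [7, 8, 9]], 3, 2)

def Spec_do_magic (board : List (List Int)) (md : Int) (ms : Int) (out : List (List Int)) : Prop := out = do_magic_alt board md ms
instance (board : List (List Int)) (md : Int) (ms : Int) (out : List (List Int)) : Decidable (Spec_do_magic board md ms out) := by unfold Spec_do_magic; infer_instance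

-- ===== CLAIM (what is proved, stated in full; the proofs are below) =====
def Claim_equal_do_magic : Prop := ∀ (board : List (List Int)) (md : Int) (ms : Int), Dom_do_magic board md ms → Pre_do_magic board md ms → Spec_do_magic board md ms (do_magic board md ms)

-- ===== LEMMAS AND PROOFS =====

-- folding a function that never changes the accumulator
theorem pv_foldl_fixed {α β : Type} (f : α → β → α) (x : α) (l : List β)
    (h : ∀ b, f x b = x) : l.foldl f x = x := by
  induction l with
  | nil => rfl
  | cons b l ih => simpa [List.foldl_cons, h b] using ih

theorem pv_set_append_len {α : Type} (P : List α) (x : α) (rest : List α) (v : α) :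
    (P ++ x :: rest).set P.length v = P ++ v :: rest := by
  induction P with
  | nil => rfl
  | cons a P ih => simp [List.set, ih]

theorem pv_getD_append_len {α : Type} (P : List α) (x : α) (rest : List α) (d : α) :
    (P ++ x :: rest).getD P.length d = x := by
  induction P with
  | nil => rfl
  | cons a P ih => simpa using ih

-- right-growing sweep: positions s+1, s+2, … while the step counter stays < B
theorem pv_foldR {α : Type} (g : α → α) (d : α) (s B : Nat) :
    ∀ (M : Nat) (b : List α), s + 1 + min M B ≤ b.length →
      (List.range M).foldl
        (fun acc k => if k < B then acc.set (s + 1 + k) (g (acc.getD (s + 1 + k) d)) else acc) b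
      = b.take (s + 1) ++ ((b.drop (s + 1)).take (min M B)).map g ++ b.drop (s + 1 + min M B) := by
  intro M
  induction M with
  | zero => intro b h; simp
  | succ M ih =>
    intro b h
    have hMB : min M B ≤ min (M + 1) B := by omega
    rw [List.range_succ, List.foldl_append]
    rw [ih b (by omega)]
    simp only [List.foldl_cons, List.foldl_nil]
    by_cases hM : M < B
    · have hmin : min M B = M := by omega
      have hmin' : min (M + 1) B = M + 1 := by omega
      have hlt : s + 1 + M < b.length := by omega
      have hP : (b.take (s + 1) ++ ((b.drop (s + 1)).take M).map g).length = s + 1 + M := by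
        simp; omega
      have hdrop : b.drop (s + 1 + M) = b[s + 1 + M] :: b.drop (s + 1 + M + 1) :=
        List.drop_eq_getElem_cons hlt
      have hseg : (b.drop (s + 1)).take (M + 1)
          = (b.drop (s + 1)).take M ++ [b[s + 1 + M]] := by
        rw [List.take_succ]
        congr 1
        rw [List.getElem?_drop]
        simp [List.getElem?_eq_getElem (by omega : s + 1 + M < b.length)]
      rw [if_pos hM]
      simp only [hmin, hmin', hdrop]
      have hgd := pv_getD_append_len (b.take (s + 1) ++ ((b.drop (s + 1)).take M).map g)
        (b[s + 1 + M]) (b.drop (s + 1 + M + 1)) d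
      have hst := pv_set_append_len (b.take (s + 1) ++ ((b.drop (s + 1)).take M).map g)
        (b[s + 1 + M]) (b.drop (s + 1 + M + 1)) (g b[s + 1 + M])
      rw [hP] at hgd hst
      rw [hgd, hst, hseg]
      simp
      omega
    · have hmin : min (M + 1) B = min M B := by omega
      rw [if_neg hM, hmin]

-- left-growing sweep: positions s-1, s-2, … while the step counter stays < B (B ≤ s)
theorem pv_foldL {α : Type} (g : α → α) (d : α) (s B : Nat) (hB : B ≤ s) :
    ∀ (M : Nat) (b : List α), s ≤ b.length →
      (List.range M).foldl
        (fun acc k => if k < B then acc.set (s - 1 - k) (g (acc.getD (s - 1 - k) d)) else acc) b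
      = b.take (s - min M B) ++ ((b.drop (s - min M B)).take (min M B)).map g ++ b.drop s := by
  intro M
  induction M with
  | zero => intro b h; simp
  | succ M ih =>
    intro b h
    rw [List.range_succ, List.foldl_append]
    rw [ih b h]
    simp only [List.foldl_cons, List.foldl_nil]
    by_cases hM : M < B
    · have hmin : min M B = M := by omega
      have hmin' : min (M + 1) B = M + 1 := by omega
      have hlt : s - M - 1 < b.length := by omega
      have htk : b.take (s - M) = b.take (s - M - 1) ++ [b[s - M - 1]] := by
        have ht := List.take_succ (l := b) (i := s - M - 1)
        rw [List.getElem?_eq_getElem hlt] at ht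
        simpa [show s - M - 1 + 1 = s - M by omega] using ht
      have hP : (b.take (s - M - 1)).length = s - M - 1 := by
        rw [List.length_take]; omega
      have hdr : b.drop (s - (M + 1)) = b[s - M - 1] :: b.drop (s - M) := by
        have hd := List.drop_eq_getElem_cons hlt
        rw [show s - M - 1 + 1 = s - M by omega] at hd
        rw [show s - (M + 1) = s - M - 1 by omega]
        exact hd
      simp only [hmin, hmin', if_pos hM, htk]
      simp only [List.append_assoc, List.singleton_append, List.cons_append, List.nil_append]
      have hgd := pv_getD_append_len (b.take (s - M - 1)) (b[s - M - 1])
        (((b.drop (s - M)).take M).map g ++ b.drop s) d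
      have hst := pv_set_append_len (b.take (s - M - 1)) (b[s - M - 1])
        (((b.drop (s - M)).take M).map g ++ b.drop s) (g b[s - M - 1])
      rw [hP] at hgd hst
      rw [show s - 1 - M = s - M - 1 by omega]
      rw [hgd]
      rw [hst]
      rw [hdr]
      simp [show s - (M + 1) = s - M - 1 by omega, List.append_assoc]
    · have hmin : min (M + 1) B = min M B := by omega
      rw [if_neg hM, hmin]

-- a fold that only rewrites row c factors through that row
theorem pv_fold_row {ι : Type} (board : List (List Int)) (c : Nat) (hc : c < board.length)
    (P : ι → Prop) [DecidablePred P] (pos : ι → Nat) (l : List ι) :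
    l.foldl (fun b dist => if P dist then b.set c ((b.getD c []).set (pos dist) 0) else b) board
    = board.set c (l.foldl (fun r dist => if P dist then r.set (pos dist) 0 else r) (board.getD c [])) := by
  have key : ∀ (l : List ι) (r : List Int),
      l.foldl (fun b dist => if P dist then b.set c ((b.getD c []).set (pos dist) 0) else b) (board.set c r)
      = board.set c (l.foldl (fun r dist => if P dist then r.set (pos dist) 0 else r) r) := by
    intro l
    induction l with
    | nil => intro r; rfl
    | cons a l ih =>
      intro r
      simp only [List.foldl_cons]
      by_cases hP : P a
      · rw [if_pos hP, if_pos hP]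
        have hget : (board.set c r).getD c [] = r := by
          unfold List.getD
          rw [List.getElem?_set_self (by omega), Option.getD_some]
        rw [hget, List.set_set, ih]
      · rw [if_neg hP, if_neg hP, ih]
  have h0 : board.set c (board.getD c []) = board := by
    have : board.getD c [] = board[c] := List.getD_eq_getElem board [] hc
    rw [this, List.set_getElem_self]
  calc l.foldl _ board = l.foldl _ (board.set c (board.getD c [])) := by rw [h0]
    _ = _ := key l (board.getD c [])

-- enumerate-and-map with a contiguous index window = take ++ mapped segment ++ drop
theorem pv_enum_window {α : Type} (b : List α) (g : α → α) (lo hi : Nat) (hlh : lo ≤ hi) :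
    (PySem.List.enumerate b 0).map
      (fun ir => if (lo : Int) ≤ ir.1 ∧ ir.1 < (hi : Int) then g ir.2 else ir.2)
    = b.take lo ++ ((b.drop lo).take (hi - lo)).map g ++ b.drop hi := by
  apply List.ext_getElem?
  intro i
  rw [List.getElem?_map, PySem.List.getElem?_enumerate]
  have hlen1 : (b.take lo).length = min lo b.length := by simp
  have hlen2 : (((b.drop lo).take (hi - lo)).map g).length = min (hi - lo) (b.length - lo) := by
    simp
  by_cases hilen : i < b.length
  · rw [List.getElem?_eq_getElem hilen]
    simp only [Option.map_some]
    by_cases h1 : i < lo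
    · rw [if_neg (by push_cast; omega)]
      rw [List.getElem?_append_left (by rw [List.length_append, hlen1, hlen2]; omega)]
      rw [List.getElem?_append_left (by rw [hlen1]; omega)]
      rw [List.getElem?_take_of_lt h1, List.getElem?_eq_getElem hilen]
    · by_cases h2 : i < hi
      · rw [if_pos (by push_cast; omega)]
        rw [List.getElem?_append_left (by rw [List.length_append, hlen1, hlen2]; omega)]
        rw [List.getElem?_append_right (by rw [hlen1]; omega)]
        rw [List.getElem?_map, hlen1]
        have : i - min lo b.length < hi - lo := by omega
        rw [List.getElem?_take_of_lt this, List.getElem?_drop]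
        rw [show lo + (i - min lo b.length) = i by omega]
        rw [List.getElem?_eq_getElem hilen]
        rfl
      · rw [if_neg (by push_cast; omega)]
        rw [List.getElem?_append_right (by rw [List.length_append, hlen1, hlen2]; omega)]
        rw [List.getElem?_drop, List.length_append, hlen1, hlen2]
        rw [show hi + (i - (min lo b.length + min (hi - lo) (b.length - lo))) = i by omega]
        rw [List.getElem?_eq_getElem hilen]
  · rw [List.getElem?_eq_none (by omega)]
    simp only [Option.map_none]
    rw [List.getElem?_eq_none]
    rw [List.length_append, List.length_append, hlen1, hlen2, List.length_drop]
    omega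

theorem pv_nilA (md ms : Int) : do_magic [] md ms = [] := by
  unfold do_magic
  apply pv_foldl_fixed
  intro d
  simp

theorem pv_nilB (md ms : Int) : do_magic_alt [] md ms = [] := by
  unfold do_magic_alt
  by_cases hms : ms ≤ 0
  · rw [if_pos hms]
  · rw [if_neg hms]
    simp [PySem.List.enumerate_nil]

theorem pv_msle (board : List (List Int)) (md ms : Int) (hms : ms ≤ 0) :
    do_magic board md ms = do_magic_alt board md ms := by
  unfold do_magic do_magic_alt
  rw [if_pos hms, PySem.List.pyRange_one_eq_nil (by omega)]
  rfl

theorem pv_floordiv_len (board : List (List Int)) :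
    PySem.Int.floordiv ((board.length : Int)) 2 = ((board.length / 2 : Nat) : Int) := by
  exact_mod_cast PySem.Int.floordiv_natCast board.length 2

theorem pv_up (board : List (List Int)) (md ms : Int) (hms : 1 ≤ ms)
    (hdx : PySem.List.pyGetD pvDx md 0 = -1) (hdy : PySem.List.pyGetD pvDy md 0 = 0)
    (hdir : PySem.List.pyGetD pvDirs md (0, 0) = (-1, 0))
    (hcond : ∀ d ∈ List.range (min ms.toNat (board.length / 2)),
      (board.getD (board.length / 2 - 1 - d) []).length > board.length / 2) :
    do_magic board md ms = do_magic_alt board md ms := by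
  by_cases hn0 : board.length = 0
  · rw [List.eq_nil_of_length_eq_zero hn0, pv_nilA, pv_nilB]
  have hn : 0 < board.length := by omega
  have hc2 : board.length / 2 < board.length := by omega
  -- A side
  unfold do_magic
  simp only [hdx, hdy, pv_floordiv_len board]
  rw [PySem.List.pyRange_one, show (ms + 1 - 1) = ms by ring, List.foldl_map]
  trans (List.foldl
    (fun (acc : List (List Int)) (k : Nat) =>
      if k < board.length / 2 then
        acc.set (board.length / 2 - 1 - k)
          ((acc.getD (board.length / 2 - 1 - k) []).set (board.length / 2) 0)
      else acc)
    board (List.range ms.toNat))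
  · apply PySem.List.foldl_congr_mem
    intro acc k _
    by_cases hk : k < board.length / 2
    · rw [if_pos (by push_cast; omega), if_pos hk]
      rw [show (((board.length / 2 : Nat) : Int) + (-1) * (1 + (k : Int))).toNat
            = board.length / 2 - 1 - k by omega]
      rw [show (((board.length / 2 : Nat) : Int) + 0 * (1 + (k : Int))).toNat
            = board.length / 2 by omega]
    · rw [if_neg (by push_cast; omega), if_neg hk]
  rw [pv_foldL (fun r => r.set (board.length / 2) 0) [] (board.length / 2) (board.length / 2)
      le_rfl ms.toNat board (le_of_lt hc2)]
  -- B side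
  unfold do_magic_alt
  rw [if_neg (by omega)]
  simp only [hdir, pv_floordiv_len board]
  rw [if_pos (show ((-1 : Int) < 0 ∨ (0 : Int) < 0) from Or.inl (by norm_num))]
  rw [if_pos trivial]
  rw [if_pos (show ((-1 : Int) < 0) from by norm_num)]
  simp only []
  rw [show ((board.length / 2 : Nat) : Int) - min ms ((board.length / 2 : Nat) : Int)
        = ((board.length / 2 - min ms.toNat (board.length / 2) : Nat) : Int) by omega]
  have hw := pv_enum_window board
      (fun r => PySem.List.slice r none (some ((board.length / 2 : Nat) : Int)) ++ [0] ++
        PySem.List.slice r (some (((board.length / 2 : Nat) : Int) + 1)) none)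
      (board.length / 2 - min ms.toNat (board.length / 2)) (board.length / 2) (by omega)
  rw [hw]
  congr 1
  congr 1
  rw [show board.length / 2 - (board.length / 2 - min ms.toNat (board.length / 2))
        = min ms.toNat (board.length / 2) by omega]
  apply List.map_congr_left
  intro r hr
  rw [List.mem_iff_getElem] at hr
  obtain ⟨j, hj, hrj⟩ := hr
  have hjlen : j < min ms.toNat (board.length / 2) := by
    have h := hj
    simp [List.length_take, List.length_drop] at h
    omega
  have hlenr := hcond (min ms.toNat (board.length / 2) - 1 - j) (List.mem_range.mpr (by omega))
  rw [show board.length / 2 - 1 - (min ms.toNat (board.length / 2) - 1 - j)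
        = board.length / 2 - min ms.toNat (board.length / 2) + j by omega] at hlenr
  rw [List.getD_eq_getElem board [] (by omega)] at hlenr
  have hrlen : board.length / 2 < r.length := by
    rw [← hrj]
    simp only [List.getElem_take, List.getElem_drop]
    exact hlenr
  rw [List.set_eq_take_append_cons_drop, if_pos hrlen]
  rw [PySem.List.slice_to_natCast]
  rw [show ((board.length / 2 : Nat) : Int) + 1 = (((board.length / 2 + 1 : Nat)) : Int) by
    push_cast; ring]
  rw [PySem.List.slice_from_natCast]
  simp

theorem pv_down (board : List (List Int)) (md ms : Int) (hms : 1 ≤ ms)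
    (hdx : PySem.List.pyGetD pvDx md 0 = 1) (hdy : PySem.List.pyGetD pvDy md 0 = 0)
    (hdir : PySem.List.pyGetD pvDirs md (0, 0) = (1, 0))
    (hcond : ∀ d ∈ List.range (min ms.toNat (board.length - 1 - board.length / 2)),
      (board.getD (board.length / 2 + 1 + d) []).length > board.length / 2) :
    do_magic board md ms = do_magic_alt board md ms := by
  by_cases hn0 : board.length = 0
  · rw [List.eq_nil_of_length_eq_zero hn0, pv_nilA, pv_nilB]
  have hn : 0 < board.length := by omega
  have hc2 : board.length / 2 < board.length := by omega
  -- A side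
  unfold do_magic
  simp only [hdx, hdy, pv_floordiv_len board]
  rw [PySem.List.pyRange_one, show (ms + 1 - 1) = ms by ring, List.foldl_map]
  trans (List.foldl
    (fun (acc : List (List Int)) (k : Nat) =>
      if k < board.length - 1 - board.length / 2 then
        acc.set (board.length / 2 + 1 + k)
          ((acc.getD (board.length / 2 + 1 + k) []).set (board.length / 2) 0)
      else acc)
    board (List.range ms.toNat))
  · apply PySem.List.foldl_congr_mem
    intro acc k _
    by_cases hk : k < board.length - 1 - board.length / 2
    · rw [if_pos (by push_cast; omega), if_pos hk]
      rw [show (((board.length / 2 : Nat) : Int) + 1 * (1 + (k : Int))).toNat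
            = board.length / 2 + 1 + k by omega]
      rw [show (((board.length / 2 : Nat) : Int) + 0 * (1 + (k : Int))).toNat
            = board.length / 2 by omega]
    · rw [if_neg (by push_cast; omega), if_neg hk]
  rw [pv_foldR (fun r => r.set (board.length / 2) 0) [] (board.length / 2)
      (board.length - 1 - board.length / 2) ms.toNat board (by omega)]
  -- B side
  unfold do_magic_alt
  rw [if_neg (by omega)]
  simp only [hdir, pv_floordiv_len board]
  rw [if_neg (show ¬((1 : Int) < 0 ∨ (0 : Int) < 0) by norm_num)]
  rw [if_pos trivial]
  rw [if_neg (show ¬((1 : Int) < 0) by norm_num)]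
  simp only []
  rw [show ((board.length / 2 : Nat) : Int) + 1 = (((board.length / 2 + 1 : Nat)) : Int) by
    push_cast; ring]
  rw [show (((board.length / 2 + 1 : Nat)) : Int) + min ms ((board.length : Int) - 1 - ((board.length / 2 : Nat) : Int))
        = ((board.length / 2 + 1 + min ms.toNat (board.length - 1 - board.length / 2) : Nat) : Int) by
    push_cast; omega]
  have hw := pv_enum_window board
      (fun r => PySem.List.slice r none (some ((board.length / 2 : Nat) : Int)) ++ [0] ++
        PySem.List.slice r (some (((board.length / 2 + 1 : Nat)) : Int)) none)
      (board.length / 2 + 1)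
      (board.length / 2 + 1 + min ms.toNat (board.length - 1 - board.length / 2)) (by omega)
  rw [hw]
  congr 1
  congr 1
  rw [show board.length / 2 + 1 + min ms.toNat (board.length - 1 - board.length / 2) - (board.length / 2 + 1)
        = min ms.toNat (board.length - 1 - board.length / 2) by omega]
  apply List.map_congr_left
  intro r hr
  rw [List.mem_iff_getElem] at hr
  obtain ⟨j, hj, hrj⟩ := hr
  have hjlen : j < min ms.toNat (board.length - 1 - board.length / 2) := by
    have h := hj
    simp [List.length_take, List.length_drop] at h
    omega
  have hlenr := hcond j (List.mem_range.mpr (by omega))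
  rw [List.getD_eq_getElem board [] (by omega)] at hlenr
  have hrlen : board.length / 2 < r.length := by
    rw [← hrj]
    simp only [List.getElem_take, List.getElem_drop]
    exact hlenr
  rw [List.set_eq_take_append_cons_drop, if_pos hrlen]
  rw [PySem.List.slice_to_natCast]
  rw [PySem.List.slice_from_natCast]
  simp

theorem pv_left (board : List (List Int)) (md ms : Int) (hms : 1 ≤ ms)
    (hdx : PySem.List.pyGetD pvDx md 0 = 0) (hdy : PySem.List.pyGetD pvDy md 0 = -1)
    (hdir : PySem.List.pyGetD pvDirs md (0, 0) = (0, -1))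
    (hcond : min ms.toNat (board.length / 2) = 0 ∨
      (board.getD (board.length / 2) []).length ≥ board.length / 2) :
    do_magic board md ms = do_magic_alt board md ms := by
  by_cases hn0 : board.length = 0
  · rw [List.eq_nil_of_length_eq_zero hn0, pv_nilA, pv_nilB]
  have hn : 0 < board.length := by omega
  have hc2 : board.length / 2 < board.length := by omega
  -- A side
  unfold do_magic
  simp only [hdx, hdy, pv_floordiv_len board]
  rw [PySem.List.pyRange_one, show (ms + 1 - 1) = ms by ring, List.foldl_map]
  trans (List.foldl
    (fun (acc : List (List Int)) (k : Nat) =>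
      if k < board.length / 2 then
        acc.set (board.length / 2)
          ((acc.getD (board.length / 2) []).set (board.length / 2 - 1 - k) 0)
      else acc)
    board (List.range ms.toNat))
  · apply PySem.List.foldl_congr_mem
    intro acc k _
    by_cases hk : k < board.length / 2
    · rw [if_pos (by push_cast; omega), if_pos hk]
      rw [show (((board.length / 2 : Nat) : Int) + 0 * (1 + (k : Int))).toNat
            = board.length / 2 by omega]
      rw [show (((board.length / 2 : Nat) : Int) + (-1) * (1 + (k : Int))).toNat
            = board.length / 2 - 1 - k by omega]
    · rw [if_neg (by push_cast; omega), if_neg hk]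
  rw [pv_fold_row board (board.length / 2) hc2 (fun k : Nat => k < board.length / 2)
      (fun k : Nat => board.length / 2 - 1 - k) (List.range ms.toNat)]
  -- B side
  unfold do_magic_alt
  rw [if_neg (by omega)]
  simp only [hdir, pv_floordiv_len board]
  rw [if_pos (Or.inr (show (-1 : Int) < 0 by norm_num))]
  rw [if_neg (show ¬((-1 : Int) = 0) by norm_num)]
  rw [if_pos (show (-1 : Int) < 0 by norm_num)]
  simp only []
  by_cases hK : min ms.toNat (board.length / 2) = 0
  · have hc0 : board.length / 2 = 0 := by omega
    rw [pv_foldl_fixed _ _ _ (fun k => by rw [if_neg (by omega)])]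
    trans (List.map (fun ir : Int × List Int => ir.2) (PySem.List.enumerate board 0))
    · rw [PySem.List.map_snd_enumerate]
      rw [List.getD_eq_getElem board [] hc2, List.set_getElem_self]
    · exact List.map_congr_left (fun ir _ => by rw [if_neg (by omega)])
  · have hclen : board.length / 2 ≤ (board.getD (board.length / 2) []).length :=
      hcond.resolve_left hK
    have hKpos : 0 < min ms.toNat (board.length / 2) := Nat.pos_of_ne_zero hK
    rw [pv_foldL (fun _ => (0 : Int)) 0 (board.length / 2) (board.length / 2)
        le_rfl ms.toNat (board.getD (board.length / 2) []) hclen]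
    rw [List.map_const']
    rw [show (List.take (min ms.toNat (board.length / 2))
        (List.drop (board.length / 2 - min ms.toNat (board.length / 2))
          (board.getD (board.length / 2) []))).length = min ms.toNat (board.length / 2) by
      rw [List.length_take, List.length_drop]; omega]
    rw [show ((board.length / 2 : Nat) : Int) - min ms ((board.length / 2 : Nat) : Int)
          = ((board.length / 2 - min ms.toNat (board.length / 2) : Nat) : Int) by omega]
    rw [show (min ms ((board.length / 2 : Nat) : Int)).toNat
          = min ms.toNat (board.length / 2) by omega]
    have hw := pv_enum_window board
      (fun r =>
        PySem.List.slice r none (some ((board.length / 2 - min ms.toNat (board.length / 2) : Nat) : Int)) ++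
          List.replicate (min ms.toNat (board.length / 2)) 0 ++
          PySem.List.slice r (some ((board.length / 2 : Nat) : Int)) none)
      (board.length / 2) (board.length / 2 + 1) (by omega)
    trans (List.map (fun ir : Int × List Int =>
        if ((board.length / 2 : Nat) : Int) ≤ ir.1 ∧ ir.1 < (((board.length / 2 + 1 : Nat)) : Int) then
          PySem.List.slice ir.2 none (some ((board.length / 2 - min ms.toNat (board.length / 2) : Nat) : Int)) ++
            List.replicate (min ms.toNat (board.length / 2)) 0 ++
            PySem.List.slice ir.2 (some ((board.length / 2 : Nat) : Int)) none
        else ir.2) (PySem.List.enumerate board 0))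
    · rw [hw]
      rw [List.drop_eq_getElem_cons hc2]
      simp only [show board.length / 2 + 1 - board.length / 2 = 1 by omega,
        List.take_succ_cons, List.take_zero, List.map_cons, List.map_nil]
      rw [List.set_eq_take_append_cons_drop, if_pos hc2]
      rw [PySem.List.slice_to_natCast, PySem.List.slice_from_natCast]
      rw [List.getD_eq_getElem board [] hc2]
      simp
    · exact List.map_congr_left
        (fun ir _ => if_congr (by constructor <;> (intro h; push_cast at h ⊢; omega)) rfl rfl)

theorem pv_right (board : List (List Int)) (md ms : Int) (hms : 1 ≤ ms)
    (hdx : PySem.List.pyGetD pvDx md 0 = 0) (hdy : PySem.List.pyGetD pvDy md 0 = 1)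
    (hdir : PySem.List.pyGetD pvDirs md (0, 0) = (0, 1))
    (hcond : min ms.toNat (board.length - 1 - board.length / 2) = 0 ∨
      (board.getD (board.length / 2) []).length ≥
        board.length / 2 + min ms.toNat (board.length - 1 - board.length / 2) + 1) :
    do_magic board md ms = do_magic_alt board md ms := by
  by_cases hn0 : board.length = 0
  · rw [List.eq_nil_of_length_eq_zero hn0, pv_nilA, pv_nilB]
  have hn : 0 < board.length := by omega
  have hc2 : board.length / 2 < board.length := by omega
  -- A side
  unfold do_magic
  simp only [hdx, hdy, pv_floordiv_len board]
  rw [PySem.List.pyRange_one, show (ms + 1 - 1) = ms by ring, List.foldl_map]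
  trans (List.foldl
    (fun (acc : List (List Int)) (k : Nat) =>
      if k < board.length - 1 - board.length / 2 then
        acc.set (board.length / 2)
          ((acc.getD (board.length / 2) []).set (board.length / 2 + 1 + k) 0)
      else acc)
    board (List.range ms.toNat))
  · apply PySem.List.foldl_congr_mem
    intro acc k _
    by_cases hk : k < board.length - 1 - board.length / 2
    · rw [if_pos (by push_cast; omega), if_pos hk]
      rw [show (((board.length / 2 : Nat) : Int) + 0 * (1 + (k : Int))).toNat
            = board.length / 2 by omega]
      rw [show (((board.length / 2 : Nat) : Int) + 1 * (1 + (k : Int))).toNat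
            = board.length / 2 + 1 + k by omega]
    · rw [if_neg (by push_cast; omega), if_neg hk]
  rw [pv_fold_row board (board.length / 2) hc2
      (fun k : Nat => k < board.length - 1 - board.length / 2)
      (fun k : Nat => board.length / 2 + 1 + k) (List.range ms.toNat)]
  -- B side
  unfold do_magic_alt
  rw [if_neg (by omega)]
  simp only [hdir, pv_floordiv_len board]
  rw [if_neg (show ¬((0 : Int) < 0 ∨ (1 : Int) < 0) by norm_num)]
  rw [if_neg (show ¬((1 : Int) = 0) by norm_num)]
  rw [if_neg (show ¬((1 : Int) < 0) by norm_num)]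
  simp only []
  by_cases hK : min ms.toNat (board.length - 1 - board.length / 2) = 0
  · have hB0 : board.length - 1 - board.length / 2 = 0 := by omega
    rw [pv_foldl_fixed _ _ _ (fun k => by rw [if_neg (by omega)])]
    trans (List.map (fun ir : Int × List Int => ir.2) (PySem.List.enumerate board 0))
    · rw [PySem.List.map_snd_enumerate]
      rw [List.getD_eq_getElem board [] hc2, List.set_getElem_self]
    · exact List.map_congr_left (fun ir _ => by rw [if_neg (by omega)])
  · have hclen : board.length / 2 + 1 + min ms.toNat (board.length - 1 - board.length / 2) ≤
        (board.getD (board.length / 2) []).length := by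
      rcases hcond with h | h
      · omega
      · omega
    have hKpos : 0 < min ms.toNat (board.length - 1 - board.length / 2) :=
      Nat.pos_of_ne_zero hK
    rw [pv_foldR (fun _ => (0 : Int)) 0 (board.length / 2)
        (board.length - 1 - board.length / 2) ms.toNat (board.getD (board.length / 2) []) hclen]
    rw [List.map_const']
    rw [show (List.take (min ms.toNat (board.length - 1 - board.length / 2))
        (List.drop (board.length / 2 + 1) (board.getD (board.length / 2) []))).length
          = min ms.toNat (board.length - 1 - board.length / 2) by
      rw [List.length_take, List.length_drop]; omega]
    rw [show ((board.length / 2 : Nat) : Int) + 1 = (((board.length / 2 + 1 : Nat)) : Int) by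
      push_cast; ring]
    rw [show (((board.length / 2 + 1 : Nat)) : Int) +
          min ms ((board.length : Int) - 1 - ((board.length / 2 : Nat) : Int))
          = ((board.length / 2 + 1 + min ms.toNat (board.length - 1 - board.length / 2) : Nat) : Int) by
      push_cast; omega]
    rw [show (min ms ((board.length : Int) - 1 - ((board.length / 2 : Nat) : Int))).toNat
          = min ms.toNat (board.length - 1 - board.length / 2) by omega]
    have hw := pv_enum_window board
      (fun r =>
        PySem.List.slice r none (some (((board.length / 2 + 1 : Nat)) : Int)) ++
          List.replicate (min ms.toNat (board.length - 1 - board.length / 2)) 0 ++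
          PySem.List.slice r
            (some ((board.length / 2 + 1 + min ms.toNat (board.length - 1 - board.length / 2) : Nat) : Int)) none)
      (board.length / 2) (board.length / 2 + 1) (by omega)
    trans (List.map (fun ir : Int × List Int =>
        if ((board.length / 2 : Nat) : Int) ≤ ir.1 ∧ ir.1 < (((board.length / 2 + 1 : Nat)) : Int) then
          PySem.List.slice ir.2 none (some (((board.length / 2 + 1 : Nat)) : Int)) ++
            List.replicate (min ms.toNat (board.length - 1 - board.length / 2)) 0 ++
            PySem.List.slice ir.2
              (some ((board.length / 2 + 1 + min ms.toNat (board.length - 1 - board.length / 2) : Nat) : Int)) none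
        else ir.2) (PySem.List.enumerate board 0))
    · rw [hw]
      rw [List.drop_eq_getElem_cons hc2]
      simp only [show board.length / 2 + 1 - board.length / 2 = 1 by omega,
        List.take_succ_cons, List.take_zero, List.map_cons, List.map_nil]
      rw [List.set_eq_take_append_cons_drop, if_pos hc2]
      rw [PySem.List.slice_to_natCast, PySem.List.slice_from_natCast]
      rw [List.getD_eq_getElem board [] hc2]
      simp
    · exact List.map_congr_left
        (fun ir _ => if_congr (by constructor <;> (intro h; push_cast at h ⊢; omega)) rfl rfl)

-- ===== VERDICT (by name: the statement is the Claim_ definition above) =====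
theorem do_magic_spec : Claim_equal_do_magic := by
  intro board md ms _ hpre
  unfold Spec_do_magic
  by_cases hms : ms ≤ 0
  · exact pv_msle board md ms hms
  have hms1 : 1 ≤ ms := by omega
  unfold Pre_do_magic at hpre
  rcases hpre with h | ⟨h1, h2, hcond⟩
  · omega
  interval_cases md
  · simp at hcond
    exact pv_up board _ ms hms1 (by decide) (by decide) (by decide) (by
      intro d hd
      rw [List.mem_range] at hd
      rw [List.getD_eq_getElem?_getD]
      exact hcond d (by omega) (by omega))
  · simp at hcond
    exact pv_down board _ ms hms1 (by decide) (by decide) (by decide) (by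
      intro d hd
      rw [List.mem_range] at hd
      rw [List.getD_eq_getElem?_getD]
      exact hcond d (by omega) (by omega))
  · simp at hcond
    exact pv_left board _ ms hms1 (by decide) (by decide) (by decide) (by
      rw [List.getD_eq_getElem?_getD]
      omega)
  · simp at hcond
    exact pv_right board _ ms hms1 (by decide) (by decide) (by decide) (by
      rw [List.getD_eq_getElem?_getD]
      omega)
  · simp at hcond
    exact pv_up board _ ms hms1 (by decide) (by decide) (by decide) (by
      intro d hd
      rw [List.mem_range] at hd
      rw [List.getD_eq_getElem?_getD]
      exact hcond d (by omega) (by omega))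
  · simp at hcond
    exact pv_down board _ ms hms1 (by decide) (by decide) (by decide) (by
      intro d hd
      rw [List.mem_range] at hd
      rw [List.getD_eq_getElem?_getD]
      exact hcond d (by omega) (by omega))
  · simp at hcond
    exact pv_left board _ ms hms1 (by decide) (by decide) (by decide) (by
      rw [List.getD_eq_getElem?_getD]
      omega)
  · simp at hcond
    exact pv_right board _ ms hms1 (by decide) (by decide) (by decide) (by
      rw [List.getD_eq_getElem?_getD]
      omega)
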